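-- pv_equiv track=rewrite | github.com/Epiconcept-Paris/deep.piste | dpiste/tools/tmp.py | find_dejavu
-- ===== SOURCE A (Python) =====
-- def find_dejavu(alltags):
--     checked = []
--     dejavu = {}
--     for tags in alltags:
--         if len(tags) > 1:
--             if tags[-1] in checked:
--                 dejavu[tags[-1]] = '/'.join(tags[:-1])
--             else:
--                 checked.append(tags[-1])
--         else:
--             if tags[0] in checked:
--                 dejavu[tags[0]] = 'Leaf'
--             else:
--                 checked.append(tags[0])
--     return dejavu
-- ===== SOURCE B (Python) =====
-- def find_dejavu(alltags):
--     # For each tag list, the key is its last element and the value is the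
--     # joined path of its ancestors ('Leaf' for a bare one-element tag).
--     pairs = [(tags[-1], 'Leaf' if len(tags) == 1 else '/'.join(tags[:-1]))
--              for tags in alltags]
--     # Index of the first occurrence of each key.
--     first = {}
--     for i, (key, _) in enumerate(pairs):
--         first.setdefault(key, i)
--     # Keep every sighting strictly after its key's first occurrence: the
--     # dict comprehension keeps the earliest such position and the latest value.
--     return {key: value
--             for i, (key, value) in enumerate(pairs)
--             if first[key] < i}
-- ===== Notes on version B (the rewrite author's own statement) =====
-- stated objective: alternative
-- what changed: A does one pass keeping a linear-scan 'checked' list and conditionally writing the result dict in two length-dependent branches; B precomputes the (key, value) pair for every tag list, builds a first-occurrence index in one setdefault pass, and returns a dict comprehension keeping every pair strictly after its key's first occurrence. Pre_ excludes inputs containing an empty inner list, on which A raises IndexError (B raises too).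
import Mathlib
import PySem

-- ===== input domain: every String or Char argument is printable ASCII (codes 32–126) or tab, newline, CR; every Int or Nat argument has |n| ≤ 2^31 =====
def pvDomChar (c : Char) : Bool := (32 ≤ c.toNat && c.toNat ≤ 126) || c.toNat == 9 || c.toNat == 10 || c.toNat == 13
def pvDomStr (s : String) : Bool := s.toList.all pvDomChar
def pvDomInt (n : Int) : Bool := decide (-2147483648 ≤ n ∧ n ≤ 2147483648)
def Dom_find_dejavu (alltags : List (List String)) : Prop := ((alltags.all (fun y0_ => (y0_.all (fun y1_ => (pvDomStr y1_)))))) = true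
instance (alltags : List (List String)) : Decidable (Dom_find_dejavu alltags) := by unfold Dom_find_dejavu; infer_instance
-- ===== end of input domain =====

-- B replaces A's linear-scan membership list and branch-wise conditional dict writes by precomputed (key, value) pairs, a first-occurrence index, and a filtered dict comprehension (alternative decomposition); equivalence proved for inputs whose inner lists are nonempty (A raises IndexError on an empty one).


-- ===== PORT A =====
-- literal port of A; tags[-1] / tags[0] use the total pyGetD form, exact under Pre_ (tags nonempty)
def find_dejavu (alltags : List (List String)) : List (String × String) :=
  (alltags.foldl
    (fun (st : List String × PySem.Dict String String) tags =>
      if 1 < tags.length then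
        let last := PySem.List.pyGetD tags (-1) ""
        if st.1.contains last then
          (st.1, st.2.insert last (PySem.Str.join "/" (PySem.List.slice tags none (some (-1)))))
        else (st.1 ++ [last], st.2)
      else
        let first := PySem.List.pyGetD tags 0 ""
        if st.1.contains first then (st.1, st.2.insert first "Leaf")
        else (st.1 ++ [first], st.2))
    ([], PySem.Dict.empty)).2.items

-- ===== PORT B =====
-- literal port of B (Source B): the pairs comprehension, the setdefault loop building the
-- first-occurrence index, then the filtered dict comprehension as a fold over enumerate;
-- Python's first[key] always hits (key is a key of `first`), ported as the total getD form
def find_dejavu_alt (alltags : List (List String)) : List (String × String) :=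
  let pairs : List (String × String) := alltags.map (fun tags =>
    (PySem.List.pyGetD tags (-1) "",
     if tags.length == 1 then "Leaf"
     else PySem.Str.join "/" (PySem.List.slice tags none (some (-1)))))
  let first : PySem.Dict String Int :=
    (PySem.List.enumerate pairs).foldl (fun d p => d.setdefault p.2.1 p.1) PySem.Dict.empty
  ((PySem.List.enumerate pairs).foldl
    (fun (d : PySem.Dict String String) p =>
      if first.getD p.2.1 0 < p.1 then d.insert p.2.1 p.2.2 else d)
    PySem.Dict.empty).items

-- ===== PRECONDITION & SPEC =====
-- Pre_ excludes inputs containing an empty inner list: there Python A (tags[-1] / tags[0]) raises IndexError, and B (tags[-1]) raises too.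
def Pre_find_dejavu (alltags : List (List String)) : Prop := ∀ tags ∈ alltags, tags ≠ []
instance (alltags : List (List String)) : Decidable (Pre_find_dejavu alltags) := by unfold Pre_find_dejavu; infer_instance
def pvWitness_find_dejavu : List (List String) := [["a", "b"], ["c"], ["a", "x", "b"], ["c"]]
def Spec_find_dejavu (alltags : List (List String)) (out : List (String × String)) : Prop := out = find_dejavu_alt alltags
instance (alltags : List (List String)) (out : List (String × String)) : Decidable (Spec_find_dejavu alltags out) := by unfold Spec_find_dejavu; infer_instance

-- ===== CLAIM (what is proved, stated in full; the proofs are below) =====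
def Claim_equal_find_dejavu : Prop := ∀ (alltags : List (List String)), Dom_find_dejavu alltags → Pre_find_dejavu alltags → Spec_find_dejavu alltags (find_dejavu alltags)

-- ===== LEMMAS AND PROOFS =====

-- the key and recorded value of one occurrence (tags nonempty)
def keyOf (tags : List String) : String := PySem.List.pyGetD tags (-1) ""
def valOf (tags : List String) : String :=
  if tags.length == 1 then "Leaf" else PySem.Str.join "/" (PySem.List.slice tags none (some (-1)))

-- A's step on nonempty tags is the uniform keyOf/valOf step
theorem stepA_eq (st : List String × PySem.Dict String String) (tags : List String) (h : tags ≠ []) :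
    (if 1 < tags.length then
        let last := PySem.List.pyGetD tags (-1) ""
        if st.1.contains last then
          (st.1, st.2.insert last (PySem.Str.join "/" (PySem.List.slice tags none (some (-1)))))
        else (st.1 ++ [last], st.2)
      else
        let first := PySem.List.pyGetD tags 0 ""
        if st.1.contains first then (st.1, st.2.insert first "Leaf")
        else (st.1 ++ [first], st.2)) =
    (if st.1.contains (keyOf tags) then (st.1, st.2.insert (keyOf tags) (valOf tags))
     else (st.1 ++ [keyOf tags], st.2)) := by
  by_cases hl : 1 < tags.length
  · have h1 : tags.length ≠ 1 := by omega
    simp [hl, keyOf, valOf, h1]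
  · rcases tags with _ | ⟨a, rest⟩
    · exact absurd rfl h
    · rcases rest with _ | ⟨b, bs⟩
      · simp [keyOf, valOf, PySem.List.pyGetD, PySem.List.pyGet?, PySem.List.pyIdx?]
      · exact absurd (by simp) hl

-- the setdefault loop's dict: first lookup that hits wins
theorem first_get?_of_contains (l : List (String × String)) (s : Int)
    (d : PySem.Dict String Int) (k : String) (hd : d.contains k = true) :
    ((PySem.List.enumerate l s).foldl (fun d p => d.setdefault p.2.1 p.1) d).get? k = d.get? k := by
  induction l generalizing s d with
  | nil => simp [PySem.List.enumerate_nil]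
  | cons x xs ih =>
    rw [PySem.List.enumerate_cons, List.foldl_cons]
    rw [ih (s + 1) _ (by rw [PySem.Dict.contains_setdefault]; simp [hd])]
    by_cases hx : k = x.1
    · obtain ⟨v, hv⟩ : ∃ v, d.get? k = some v := by
        rw [PySem.Dict.contains_eq_isSome_get?] at hd
        exact Option.isSome_iff_exists.mp hd
      rw [← hx, PySem.Dict.get?_setdefault_self, hv]
      simp
    · exact PySem.Dict.get?_setdefault_of_ne d s hx

theorem first_get? (l : List (String × String)) (s : Int)
    (d : PySem.Dict String Int) (k : String) (hd : d.contains k = false) :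
    ((PySem.List.enumerate l s).foldl (fun d p => d.setdefault p.2.1 p.1) d).get? k =
      (l.findIdx? (fun p => p.1 == k)).map (fun n : Nat => s + (n : Int)) := by
  induction l generalizing s d with
  | nil =>
    rw [PySem.List.enumerate_nil]
    simp [(PySem.Dict.get?_eq_none_iff_contains d k).2 hd]
  | cons x xs ih =>
    rw [PySem.List.enumerate_cons, List.foldl_cons, List.findIdx?_cons]
    by_cases hx : x.1 = k
    · have hset : (d.setdefault x.1 s).contains k = true := by
        rw [PySem.Dict.contains_setdefault]; simp [hx]
      rw [first_get?_of_contains _ _ _ _ hset, ← hx,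
        PySem.Dict.get?_setdefault_self,
        (PySem.Dict.get?_eq_none_iff_contains d x.1).2 (by rw [hx]; exact hd)]
      simp [hx]
    · have hset : (d.setdefault x.1 s).contains k = false := by
        rw [PySem.Dict.contains_setdefault]
        have hkx : (k == x.1) = false := beq_eq_false_iff_ne.mpr (fun h => hx h.symm)
        simp [hd, hkx]
      rw [ih (s + 1) _ hset]
      have hb : (x.1 == k) = false := by simp [hx]
      rw [hb]
      simp only [Bool.false_eq_true, if_false, Option.map_map]
      cases xs.findIdx? (fun p => p.1 == k)
      · simp
      · simp; omega

-- the first-occurrence test at position pre.length decides membership of k in the prefix keys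
theorem first_test (pre suf : List (String × String)) (k v : String) :
    (((PySem.List.enumerate (pre ++ (k, v) :: suf) 0).foldl
        (fun d p => d.setdefault p.2.1 p.1) PySem.Dict.empty).getD k 0 < (pre.length : Int)) ↔
      k ∈ pre.map Prod.fst := by
  rw [PySem.Dict.getD_eq_get?_getD, first_get? _ _ _ _ (PySem.Dict.contains_empty k)]
  by_cases hmem : k ∈ pre.map Prod.fst
  · rcases List.mem_map.1 hmem with ⟨p, hp, hpk⟩
    have hsome : (pre.findIdx? (fun q => q.1 == k)).isSome := by
      rw [List.findIdx?_isSome]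
      exact List.any_eq_true.2 ⟨p, hp, by simp [hpk]⟩
    rcases Option.isSome_iff_exists.1 hsome with ⟨n, hn⟩
    have hlt : n < pre.length := (List.findIdx?_eq_some_iff_findIdx_eq.mp hn).1
    rw [List.findIdx?_append, hn]
    simp only [Option.some_or, Option.map_some, Option.getD_some]
    constructor
    · intro _; exact hmem
    · intro _; omega
  · have hnone : pre.findIdx? (fun p => p.1 == k) = none := by
      rw [List.findIdx?_eq_none_iff]
      intro p hp
      simp only [beq_eq_false_iff_ne, ne_eq]
      exact fun h => hmem (List.mem_map.2 ⟨p, hp, h⟩)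
    rw [List.findIdx?_append, hnone]
    simp only [Option.none_or, List.findIdx?_cons, beq_self_eq_true, if_pos,
      Option.map_some, Option.getD_some]
    constructor
    · intro h; exfalso; push_cast at h; omega
    · intro h; exact absurd h hmem

-- simulation: A's fold over the suffix equals B's insert fold over the enumerated suffix
theorem sim (pairsAll : List (String × String)) (suf : List (List String))
    (pre : List (String × String))
    (hsplit : pairsAll = pre ++ suf.map (fun t => (keyOf t, valOf t)))
    (hne : ∀ t ∈ suf, t ≠ [])
    (checked : List String) (d : PySem.Dict String String)
    (hch : ∀ k, checked.contains k = (pre.map Prod.fst).contains k) :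
    (suf.foldl
      (fun (st : List String × PySem.Dict String String) tags =>
        if 1 < tags.length then
          let last := PySem.List.pyGetD tags (-1) ""
          if st.1.contains last then
            (st.1, st.2.insert last (PySem.Str.join "/" (PySem.List.slice tags none (some (-1)))))
          else (st.1 ++ [last], st.2)
        else
          let first := PySem.List.pyGetD tags 0 ""
          if st.1.contains first then (st.1, st.2.insert first "Leaf")
          else (st.1 ++ [first], st.2))
      (checked, d)).2 =
    (PySem.List.enumerate (suf.map (fun t => (keyOf t, valOf t))) (pre.length : Int)).foldl
      (fun (d : PySem.Dict String String) p =>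
        if (((PySem.List.enumerate pairsAll 0).foldl
              (fun d p => d.setdefault p.2.1 p.1) PySem.Dict.empty).getD p.2.1 0 < p.1)
        then d.insert p.2.1 p.2.2 else d)
      d := by
  induction suf generalizing pre checked d with
  | nil => simp [PySem.List.enumerate_nil]
  | cons t rest ih =>
    have htne : t ≠ [] := hne t (by simp)
    rw [List.foldl_cons, stepA_eq (checked, d) t htne, List.map_cons,
      PySem.List.enumerate_cons, List.foldl_cons]
    have hsplit' : pairsAll = (pre ++ [(keyOf t, valOf t)]) ++ rest.map (fun t => (keyOf t, valOf t)) := by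
      rw [hsplit]; simp
    have htest : (((PySem.List.enumerate pairsAll 0).foldl
          (fun d p => d.setdefault p.2.1 p.1) PySem.Dict.empty).getD (keyOf t) 0 < (pre.length : Int)) ↔
        keyOf t ∈ pre.map Prod.fst := by
      rw [hsplit, List.map_cons]
      exact first_test pre (rest.map (fun t => (keyOf t, valOf t))) (keyOf t) (valOf t)
    have hchmem : checked.contains (keyOf t) = decide (keyOf t ∈ pre.map Prod.fst) := by
      rw [hch]; simp
    have hlen : ((pre ++ [(keyOf t, valOf t)]).length : Int) = (pre.length : Int) + 1 := by
      simp
    have hrestne : ∀ u ∈ rest, u ≠ [] := fun u hu => hne u (by simp [hu])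
    by_cases hmem : keyOf t ∈ pre.map Prod.fst
    · rw [if_pos (by rw [hchmem]; simp [hmem]), if_pos (htest.2 hmem)]
      have := ih (pre ++ [(keyOf t, valOf t)]) hsplit' hrestne checked
        (d.insert (keyOf t) (valOf t))
        (fun k => by
          rw [hch]
          simp only [List.map_append, List.contains_append, List.map_cons, List.map_nil,
            List.contains_cons, List.contains_nil, Bool.or_false]
          by_cases hkk : k = keyOf t
          · subst hkk
            obtain ⟨p, hp, hpk⟩ := List.mem_map.1 hmem
            have hmem' : (keyOf t, p.2) ∈ pre := by rw [← hpk]; simpa using hp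
            simp
            exact ⟨p.2, hmem'⟩
          · simp [beq_eq_false_iff_ne.mpr hkk])
      rw [this, hlen]
    · rw [if_neg (by rw [hchmem]; simp [hmem]), if_neg (by rw [htest]; exact hmem)]
      have := ih (pre ++ [(keyOf t, valOf t)]) hsplit' hrestne (checked ++ [keyOf t]) d
        (fun k => by
          rw [List.contains_append, hch]
          by_cases h : k = keyOf t <;> by_cases h2 : k ∈ pre.map Prod.fst <;> simp [h, h2])
      rw [this, hlen]

-- ===== VERDICT (by name: the statement is the Claim_ definition above) =====
theorem find_dejavu_spec : Claim_equal_find_dejavu := by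
  intro alltags _ hpre
  unfold Spec_find_dejavu find_dejavu find_dejavu_alt
  have hpairs : alltags.map (fun tags =>
      (PySem.List.pyGetD tags (-1) "",
       if tags.length == 1 then "Leaf"
       else PySem.Str.join "/" (PySem.List.slice tags none (some (-1))))) =
      alltags.map (fun t => (keyOf t, valOf t)) := rfl
  simp only [hpairs]
  congr 1
  have := sim (alltags.map (fun t => (keyOf t, valOf t))) alltags [] (by simp) hpre []
    PySem.Dict.empty (fun k => by simp)
  simpa using this
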